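-- pv_equiv track=rewrite | github.com/PhilippeCarphin/ImageEncodingPerf | src/algo/bytepair_phil.py | get_pair_frequencies
-- ===== SOURCE A (Python) =====
-- def get_pair_frequencies(string):
--     pair_frequencies = {}
--     for i in range(len(string) - 2):
--
--         pair = tuple(string[i:i+2])
--
--         if pair in pair_frequencies:
--             pair_frequencies[pair] += 1
--         else:
--             pair_frequencies[pair] = 1
--
--     return pair_frequencies
-- ===== SOURCE B (Python) =====
-- def get_pair_frequencies(string):
--     # Build the pair list first (same truncation as the original: the last
--     # adjacent pair is skipped), then count each distinct pair in one call.
--     pairs = [tuple(string[i:i+2]) for i in range(len(string) - 2)]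
--     return {p: pairs.count(p) for p in dict.fromkeys(pairs)}
-- ===== Notes on version B (the rewrite author's own statement) =====
-- stated objective: alternative
-- what changed: Replaces the incremental if-in-dict counting loop by building the pair list once, deduplicating it with dict.fromkeys and counting each distinct pair with list.count.
import Mathlib
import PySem

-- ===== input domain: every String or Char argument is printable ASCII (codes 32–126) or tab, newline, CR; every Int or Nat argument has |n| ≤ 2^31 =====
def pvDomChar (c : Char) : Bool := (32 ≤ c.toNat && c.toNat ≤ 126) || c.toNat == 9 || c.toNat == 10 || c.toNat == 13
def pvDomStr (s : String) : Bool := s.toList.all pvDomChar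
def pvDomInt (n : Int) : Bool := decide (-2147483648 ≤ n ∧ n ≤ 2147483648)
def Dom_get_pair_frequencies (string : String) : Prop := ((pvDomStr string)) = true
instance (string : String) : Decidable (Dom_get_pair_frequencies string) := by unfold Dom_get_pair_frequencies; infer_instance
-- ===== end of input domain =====

-- ===== PORT A =====
-- B is an alternative of the same cost: it builds the pair list once, dedups it and counts each
-- distinct pair, instead of A's incremental if-in-dict counting loop.

-- tuple(string[i:i+2]) as a pair of one-character strings (the slice has length 2 for every
-- index both Pythons generate); both Pythons form the pair by this same expression.
def pvPairAt (cs : List Char) (i : Int) : String × String :=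
  let s := PySem.List.slice cs (some i) (some (i + 2))
  (String.ofList (s.take 1), String.ofList (s.drop 1))

def get_pair_frequencies (string : String) : List (String × String × Int) :=
  let cs := string.toList
  let d := (PySem.List.pyRange 0 ((cs.length : Int) - 2) 1).foldl
    (fun (d : PySem.Dict (String × String) Int) i =>
      let pair := pvPairAt cs i
      if d.contains pair then d.insert pair (d.getD pair 0 + 1)
      else d.insert pair 1)
    PySem.Dict.empty
  d.items.map (fun p => (p.1.1, p.1.2, p.2))

-- ===== PORT B =====
def get_pair_frequencies_alt (string : String) : List (String × String × Int) :=
  let cs := string.toList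
  let pairs := (PySem.List.pyRange 0 ((cs.length : Int) - 2) 1).map (fun i => pvPairAt cs i)
  (PySem.List.dedup pairs).map (fun p => (p.1, p.2, (pairs.count p : Int)))

-- ===== PRECONDITION & SPEC =====
def Spec_get_pair_frequencies (string : String) (out : List (String × String × Int)) : Prop := out = get_pair_frequencies_alt string
instance (string : String) (out : List (String × String × Int)) : Decidable (Spec_get_pair_frequencies string out) := by unfold Spec_get_pair_frequencies; infer_instance

-- ===== CLAIM (what is proved, stated in full; the proofs are below) =====
def Claim_equal_get_pair_frequencies : Prop := ∀ (string : String), Dom_get_pair_frequencies string → Spec_get_pair_frequencies string (get_pair_frequencies string)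

-- ===== LEMMAS AND PROOFS =====

-- A's if-in-dict step is exactly the Counter step: when the key is absent getD gives 0.
theorem pvStepEq (d : PySem.Dict (String × String) Int) (p : String × String) :
    (if d.contains p then d.insert p (d.getD p 0 + 1) else d.insert p 1)
      = d.insert p (d.getD p 0 + 1) := by
  by_cases h : d.contains p = true
  · simp [h]
  · have h0 : d.getD p 0 = 0 := by
      simp only [Bool.not_eq_true] at h
      simp [PySem.Dict.getD, (PySem.Dict.get?_eq_none_iff_not_mem_keys d p).2
        (by simpa [PySem.Dict.contains_eq_decide_mem_keys] using h)]
    simp [h, h0]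

-- ===== VERDICT (by name: the statement is the Claim_ definition above) =====
theorem get_pair_frequencies_spec : Claim_equal_get_pair_frequencies := by
  intro string _
  show _ = _
  unfold get_pair_frequencies get_pair_frequencies_alt
  simp only []
  set cs := string.toList
  set pairs := (PySem.List.pyRange 0 ((cs.length : Int) - 2) 1).map (fun i => pvPairAt cs i)
    with hpairs
  have hfold : (PySem.List.pyRange 0 ((cs.length : Int) - 2) 1).foldl
      (fun (d : PySem.Dict (String × String) Int) i =>
        let pair := pvPairAt cs i
        if d.contains pair then d.insert pair (d.getD pair 0 + 1)
        else d.insert pair 1)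
      PySem.Dict.empty = PySem.Dict.counter pairs := by
    rw [PySem.Dict.counter_eq_foldl, List.foldl_map]
    refine PySem.List.foldl_congr_mem _ _ _ _ (fun d i _ => ?_)
    rw [pvStepEq]
    simp [PySem.Dict.modify, PySem.Dict.getD]
  rw [hfold, PySem.Dict.items_counter, List.map_map, PySem.List.dedup_eq_ofList]
  simp [Function.comp]
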